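-- pv_equiv track=rewrite | github.com/NNChawla/SkillsTransferPrediction | scripts/combination_interface.py | generate_metadata_combinations
-- ===== SOURCE A (Python) =====
-- from itertools import combinations
--
-- def generate_metadata_combinations(metadata_fields, required_fields, combo_sizes):
--     """Generate combinations of metadata fields, always including required fields"""
--     if not metadata_fields:
--         return {'none': []}
--
--     # Ensure required fields exist in metadata_fields
--     required_fields = [f for f in required_fields if f in metadata_fields]
--
--     # If there are required fields, don't include 'none' option
--     metadata_sets = {} if required_fields else {'none': []}
--
--     if not required_fields:
--         # If no required fields, generate regular combinations
--         for size in combo_sizes: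
--             if size <= len(metadata_fields):
--                 for combo in combinations(metadata_fields, size):
--                     key_name = '_'.join(field.lower() for field in combo)
--                     if len(combo) == len(metadata_fields):
--                         key_name = 'all'
--                     metadata_sets[key_name] = list(combo)
--         return metadata_sets
--
--     # Get remaining fields
--     remaining_fields = [f for f in metadata_fields if f not in required_fields]
--
--     # For each combination size
--     for size in combo_sizes:
--         if size < len(required_fields):
--             continue  # Skip if size is smaller than number of required fields
--
--         # Calculate how many additional fields we need
--         additional_needed = size - len(required_fields)
--
--         # Generate combinations of remaining fields
--         if additional_needed > 0 and remaining_fields: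
--             for combo in combinations(remaining_fields, additional_needed):
--                 # Combine with required fields
--                 full_combo = list(required_fields) + list(combo)
--                 key_name = '_'.join(field.lower() for field in full_combo)
--                 if len(full_combo) == len(metadata_fields):
--                     key_name = 'all'
--                 metadata_sets[key_name] = full_combo
--         elif additional_needed == 0:
--             # If size exactly matches required fields, add just those
--             key_name = '_'.join(field.lower() for field in required_fields)
--             if len(required_fields) == len(metadata_fields):
--                 key_name = 'all'
--             metadata_sets[key_name] = list(required_fields)
--
--     return metadata_sets
-- ===== SOURCE B (Python) =====
-- def _by_size(fields):
--     """Table t with t[k] = all size-k sublists of fields, in lexicographic order,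
--     built by one Pascal-style structural recursion over the field list."""
--     if not fields:
--         return [[[]]]
--     f = fields[0]
--     rest = _by_size(fields[1:])
--     shifted = [[[f] + c for c in row] for row in rest]
--     tails = rest[1:] + [[]]
--     return [rest[0]] + [w + t for w, t in zip(shifted, tails)]
--
--
-- def generate_metadata_combinations(metadata_fields, required_fields, combo_sizes):
--     """Generate combinations of metadata fields, always including required fields"""
--     if not metadata_fields:
--         return {'none': []}
--     required = [f for f in required_fields if f in metadata_fields]
--     remaining = [f for f in metadata_fields if f not in required]
--     by_size = _by_size(remaining)
--     result = {} if required else {'none': []}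
--     n = len(metadata_fields)
--     for size in combo_sizes:
--         needed = size - len(required)
--         if 0 <= needed < len(by_size):
--             for combo in by_size[needed]:
--                 full = required + combo
--                 key = 'all' if len(full) == n else '_'.join(x.lower() for x in full)
--                 result[key] = full
--     return result
-- ===== Notes on version B (the rewrite author's own statement) =====
-- stated objective: alternative
-- what changed: B replaces A's per-size itertools.combinations calls and branchy required/no-required code paths with a single Pascal-style structural recursion that builds, once, a table indexed by size of all sublists of the optional fields, then answers every requested combo size by one table lookup.
import Mathlib
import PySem

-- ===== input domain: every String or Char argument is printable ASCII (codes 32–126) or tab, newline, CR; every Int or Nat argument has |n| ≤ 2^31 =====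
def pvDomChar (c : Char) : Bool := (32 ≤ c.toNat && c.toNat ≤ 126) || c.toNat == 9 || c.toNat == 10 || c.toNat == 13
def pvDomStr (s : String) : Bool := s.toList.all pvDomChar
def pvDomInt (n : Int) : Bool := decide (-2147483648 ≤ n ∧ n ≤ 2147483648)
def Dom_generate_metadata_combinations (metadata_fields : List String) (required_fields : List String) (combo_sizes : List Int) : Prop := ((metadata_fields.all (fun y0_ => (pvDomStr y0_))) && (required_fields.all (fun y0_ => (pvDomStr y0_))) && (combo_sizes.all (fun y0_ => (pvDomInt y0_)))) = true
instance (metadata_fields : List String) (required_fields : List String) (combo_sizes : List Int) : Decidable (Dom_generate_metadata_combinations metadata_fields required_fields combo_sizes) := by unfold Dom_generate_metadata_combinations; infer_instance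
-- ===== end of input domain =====

-- B builds a size-indexed table of all sublists of the optional fields once (Pascal-style
-- recursion) and answers each combo size by table lookup (objective: alternative);
-- same return value wherever A returns.

-- ===== PORT A =====
def generate_metadata_combinations (metadata_fields : List String) (required_fields : List String) (combo_sizes : List Int) : List (String × List String) :=
  if metadata_fields = [] then [("none", [])]
  else
    let required_fields := required_fields.filter (fun f => metadata_fields.contains f)
    let metadata_sets : PySem.Dict String (List String) :=
      if required_fields = [] then PySem.Dict.ofList [("none", [])] else PySem.Dict.empty
    if required_fields = [] then
      (combo_sizes.foldl (fun d size =>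
        if size ≤ (metadata_fields.length : Int) then
          (PySem.List.combinations metadata_fields size.toNat).foldl (fun d combo =>
            let key_name := PySem.Str.join "_" (combo.map PySem.Str.lower)
            let key_name := if combo.length = metadata_fields.length then "all" else key_name
            d.insert key_name combo) d
        else d) metadata_sets).items
    else
      let remaining_fields := metadata_fields.filter (fun f => !required_fields.contains f)
      (combo_sizes.foldl (fun d size =>
        if size < (required_fields.length : Int) then d
        else
          let additional_needed := size - (required_fields.length : Int)
          if 0 < additional_needed ∧ remaining_fields ≠ [] then
            (PySem.List.combinations remaining_fields additional_needed.toNat).foldl (fun d combo =>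
              let full_combo := required_fields ++ combo
              let key_name := PySem.Str.join "_" (full_combo.map PySem.Str.lower)
              let key_name := if full_combo.length = metadata_fields.length then "all" else key_name
              d.insert key_name full_combo) d
          else if additional_needed = 0 then
            let key_name := PySem.Str.join "_" (required_fields.map PySem.Str.lower)
            let key_name := if required_fields.length = metadata_fields.length then "all" else key_name
            d.insert key_name required_fields
          else d) metadata_sets).items

-- ===== PORT B =====
-- _by_size: the [] branch of the inner match is unreachable (the table is never empty);
-- rest[0] of Source B is the r0 of the match.
def pvBySize_generate_metadata_combinations : List String → List (List (List String))
  | [] => [[[]]]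
  | f :: rest =>
    match pvBySize_generate_metadata_combinations rest with
    | [] => []
    | r0 :: rs =>
      let shifted := (r0 :: rs).map (fun row => row.map (fun c => f :: c))
      let tails := rs ++ [[]]
      r0 :: (shifted.zip tails).map (fun p => p.1 ++ p.2)

def generate_metadata_combinations_alt (metadata_fields : List String) (required_fields : List String) (combo_sizes : List Int) : List (String × List String) :=
  if metadata_fields = [] then [("none", [])]
  else
    let required := required_fields.filter (fun f => metadata_fields.contains f)
    let remaining := metadata_fields.filter (fun f => !required.contains f)
    let by_size := pvBySize_generate_metadata_combinations remaining
    let init : PySem.Dict String (List String) :=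
      if required = [] then PySem.Dict.ofList [("none", [])] else PySem.Dict.empty
    (combo_sizes.foldl (fun d size =>
      let needed := size - (required.length : Int)
      if 0 ≤ needed ∧ needed < (by_size.length : Int) then
        (by_size.getD needed.toNat []).foldl (fun d combo =>
          let full := required ++ combo
          let key := if full.length = metadata_fields.length then "all"
                     else PySem.Str.join "_" (full.map PySem.Str.lower)
          d.insert key full) d
      else d) init).items

-- ===== PRECONDITION & SPEC =====
-- Pre_ excludes exactly the inputs on which A raises ValueError: a non-empty metadata_fields with
-- no required field present and a negative combo size reaches combinations(..., negative).
def Pre_generate_metadata_combinations (metadata_fields : List String) (required_fields : List String) (combo_sizes : List Int) : Prop :=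
  metadata_fields = [] ∨ (∃ f ∈ required_fields, f ∈ metadata_fields) ∨ ∀ s ∈ combo_sizes, 0 ≤ s
instance (metadata_fields : List String) (required_fields : List String) (combo_sizes : List Int) : Decidable (Pre_generate_metadata_combinations metadata_fields required_fields combo_sizes) := by unfold Pre_generate_metadata_combinations; infer_instance

def pvWitness_generate_metadata_combinations : List String × List String × List Int := (["A", "B", "C"], ["A"], [1, 2, 3])

def Spec_generate_metadata_combinations (metadata_fields : List String) (required_fields : List String) (combo_sizes : List Int) (out : List (String × List String)) : Prop := out = generate_metadata_combinations_alt metadata_fields required_fields combo_sizes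
instance (metadata_fields : List String) (required_fields : List String) (combo_sizes : List Int) (out : List (String × List String)) : Decidable (Spec_generate_metadata_combinations metadata_fields required_fields combo_sizes out) := by unfold Spec_generate_metadata_combinations; infer_instance

-- ===== CLAIM (what is proved, stated in full; the proofs are below) =====
def Claim_equal_generate_metadata_combinations : Prop := ∀ (metadata_fields : List String) (required_fields : List String) (combo_sizes : List Int), Dom_generate_metadata_combinations metadata_fields required_fields combo_sizes → Pre_generate_metadata_combinations metadata_fields required_fields combo_sizes → Spec_generate_metadata_combinations metadata_fields required_fields combo_sizes (generate_metadata_combinations metadata_fields required_fields combo_sizes)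

-- ===== LEMMAS AND PROOFS =====

-- getD through the zip/map row combiner of pvBySize (lengths agree in every use)
lemma pvZipMap_getD (f : String) : ∀ (t tails : List (List (List String))) (k : Nat),
    tails.length = t.length →
    (((t.map (fun row => row.map (fun c => f :: c))).zip tails).map (fun p => p.1 ++ p.2)).getD k []
      = ((t.getD k []).map (fun c => f :: c)) ++ tails.getD k [] := by
  intro t
  induction t with
  | nil =>
    intro tails k hlen
    have : tails = [] := List.eq_nil_of_length_eq_zero hlen
    simp [this, List.getD]
  | cons r t ih =>
    intro tails k hlen
    cases tails with
    | nil => simp at hlen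
    | cons s tails =>
      cases k with
      | zero => simp [List.getD]
      | succ k => simpa [List.getD] using ih tails k (by simpa using hlen)

lemma pvAppend_nil_getD : ∀ (rs : List (List (List String))) (k : Nat),
    (rs ++ [[]]).getD k [] = rs.getD k [] := by
  intro rs
  induction rs with
  | nil => intro k; cases k <;> simp [List.getD]
  | cons r rs ih =>
    intro k
    cases k with
    | zero => simp [List.getD]
    | succ k => simpa [List.getD] using ih k

-- the table has length |xs|+1 and its k-th row is combinations xs k
lemma pvBySize_spec (xs : List String) :
    (pvBySize_generate_metadata_combinations xs).length = xs.length + 1 ∧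
    ∀ k, (pvBySize_generate_metadata_combinations xs).getD k [] = PySem.List.combinations xs k := by
  induction xs with
  | nil =>
    refine ⟨rfl, ?_⟩
    intro k
    cases k with
    | zero => simp [pvBySize_generate_metadata_combinations, PySem.List.combinations_zero, List.getD]
    | succ k =>
      simp [pvBySize_generate_metadata_combinations, PySem.List.combinations_nil_succ, List.getD]
  | cons f rest ih =>
    obtain ⟨hlen, hget⟩ := ih
    cases ht : pvBySize_generate_metadata_combinations rest with
    | nil => rw [ht] at hlen; simp at hlen
    | cons r0 rs =>
      rw [ht] at hlen hget
      have hlen' : rs.length = rest.length := by simpa using hlen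
      constructor
      · simp [pvBySize_generate_metadata_combinations, ht, hlen']
      · intro k
        cases k with
        | zero =>
          have := hget 0
          simp [List.getD] at this
          simp [pvBySize_generate_metadata_combinations, ht, List.getD,
            PySem.List.combinations_zero, this]
        | succ k =>
          have h1 := pvZipMap_getD f (r0 :: rs) (rs ++ [[]]) k (by simp)
          have h2 := pvAppend_nil_getD rs k
          rw [PySem.List.combinations_cons_succ, ← hget k, ← hget (k + 1)]
          simp only [pvBySize_generate_metadata_combinations, ht]
          simp only [List.getD] at h1 h2 ⊢
          simp only [List.getElem?_cons_succ]
          rw [h1, h2]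

-- ===== VERDICT (by name: the statement is the Claim_ definition above) =====
theorem generate_metadata_combinations_spec : Claim_equal_generate_metadata_combinations := by
  intro mf rf cs _ hpre
  unfold Spec_generate_metadata_combinations generate_metadata_combinations generate_metadata_combinations_alt
  by_cases hmf : mf = []
  · simp [hmf]
  rw [if_neg hmf, if_neg hmf]
  by_cases hr : rf.filter (fun f => mf.contains f) = []
  · -- no required fields present
    have hnn : ∀ s ∈ cs, 0 ≤ s := by
      rcases hpre with h | ⟨f, hf, hfm⟩ | h
      · exact absurd h hmf
      · exfalso
        have hmem : f ∈ rf.filter (fun f => mf.contains f) :=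
          List.mem_filter.mpr ⟨hf, by simp [hfm]⟩
        rw [hr] at hmem
        simp at hmem
      · exact h
    obtain ⟨hL, hG⟩ := pvBySize_spec mf
    simp only [hr, if_true, List.contains_nil, Bool.not_false, List.filter_true,
      List.length_nil, Nat.cast_zero, Int.sub_zero, List.nil_append]
    congr 1
    apply PySem.List.foldl_congr_mem
    intro d s hs
    have h0 : 0 ≤ s := hnn s hs
    by_cases hle : s ≤ (mf.length : Int)
    · rw [if_pos hle, if_pos (by rw [hL]; push_cast; omega), hG]
    · rw [if_neg hle, if_neg (by rw [hL]; push_cast; omega)]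
  · -- required fields present
    simp only [hr, if_false]
    obtain ⟨hL, hG⟩ :=
      pvBySize_spec (mf.filter (fun f => !(rf.filter (fun f => mf.contains f)).contains f))
    congr 1
    apply PySem.List.foldl_congr_mem
    intro d s hs
    set req := rf.filter (fun f => mf.contains f) with hreqdef
    set rem := mf.filter (fun f => !req.contains f) with hremdef
    have hBlen : ((pvBySize_generate_metadata_combinations rem).length : Int)
        = (rem.length : Int) + 1 := by rw [hL]; push_cast; ring
    rw [hBlen]
    split_ifs with h1 h2 h3 h4 h5 h6 h7 h8 h9 <;> try rfl
    · exact absurd h2.1 (by omega)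
    · rw [hG]
    · have hge : (rem.length : Int) + 1 ≤ s - (req.length : Int) := by
        by_contra hc
        exact h4 ⟨by omega, by omega⟩
      rw [PySem.List.combinations_eq_nil_of_length_lt rem (by omega), List.foldl_nil]
    · rw [h5]
      simp only [Int.toNat_zero]
      rw [hG 0, PySem.List.combinations_zero]
      simp [h6]
    · exact absurd (⟨by omega, by omega⟩ : _ ∧ _) h7
    · rw [h5]
      simp only [Int.toNat_zero]
      rw [hG 0, PySem.List.combinations_zero]
      simp [h6]
    · exact absurd (⟨by omega, by omega⟩ : _ ∧ _) h8
    · obtain ⟨ha, hb⟩ := h9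
      rcases not_and_or.mp h3 with hc | hc
      · omega
      · have hniL : rem = [] := not_ne_iff.mp hc
        rw [hniL] at hb
        simp at hb
        omega
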